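-- pv_equiv track=rewrite | github.com/xzloqy/zutnlp_framework | base/data/base_data_loader.py | maxLens
-- ===== SOURCE A (Python) =====
-- def maxLens(X):
--     """
--     max_lens
--     """
--     if not isinstance(X[0], list):
--         return [len(X)]
--     elif not isinstance(X[0][0], list):
--         return [len(X), max(len(x) for x in X)]
--     elif not isinstance(X[0][0][0], list):
--         return [
--             len(X),
--             max(len(x) for x in X),
--             max(len(x) for xs in X for x in xs)
--         ]
--     else:
--         raise ValueError(
--             "Data list whose dim is greater than 3 is not supported!")
-- ===== SOURCE B (Python) =====
-- def maxLens(X):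
--     # Generic recursive shape inference: one traversal computing, for every
--     # subtree, the vector of per-dimension maxima, merged elementwise
--     # bottom-up (no depth ladder, no per-level max() passes).
--     def dims(v, depth):
--         if not isinstance(v, list):
--             return []
--         if depth == 3:
--             raise ValueError(
--                 "Data list whose dim is greater than 3 is not supported!")
--         sub = []
--         for child in v:
--             d = dims(child, depth + 1)
--             for i, val in enumerate(d):
--                 if i < len(sub):
--                     if val > sub[i]:
--                         sub[i] = val
--                 else:
--                     sub.append(val)
--         return [len(v)] + sub
--     return dims(X, 0)
-- ===== Notes on version B (the rewrite author's own statement) =====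
-- stated objective: alternative
-- what changed: Replaces A's isinstance depth ladder with separate per-level max() passes by a single recursive traversal that computes each subtree's per-dimension maxima vector and merges child vectors elementwise with padding.
import Mathlib
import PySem

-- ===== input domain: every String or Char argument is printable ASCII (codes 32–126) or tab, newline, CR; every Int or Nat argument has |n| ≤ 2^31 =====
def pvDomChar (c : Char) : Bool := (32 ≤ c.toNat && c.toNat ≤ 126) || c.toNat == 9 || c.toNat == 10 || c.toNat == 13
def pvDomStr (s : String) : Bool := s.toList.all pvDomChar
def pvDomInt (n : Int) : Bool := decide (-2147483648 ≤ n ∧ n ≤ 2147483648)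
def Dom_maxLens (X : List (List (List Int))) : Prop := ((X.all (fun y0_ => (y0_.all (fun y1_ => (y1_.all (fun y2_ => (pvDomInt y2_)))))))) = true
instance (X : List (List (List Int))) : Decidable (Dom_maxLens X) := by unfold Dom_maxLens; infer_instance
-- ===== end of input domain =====

-- B replaces A's isinstance depth ladder with per-level max() passes by ONE
-- recursive traversal computing each subtree's per-dimension maxima vector,
-- merged elementwise with padding (alternative decomposition, same cost).

-- ===== PORT A =====
-- In the typed domain X : List (List (List Int)), isinstance(X[0], list) and
-- isinstance(X[0][0], list) are True and isinstance(X[0][0][0], list) is False,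
-- so A takes the third branch; the pyGet? matches are the X[0]/X[0][0]/X[0][0][0]
-- subscripts that can raise IndexError (none = raise, excluded by Pre_).
def maxLens (X : List (List (List Int))) : List Int :=
  match PySem.List.pyGet? X 0 with
  | none => []                      -- X[0] raises IndexError
  | some x0 =>
    match PySem.List.pyGet? x0 0 with
    | none => []                    -- X[0][0] raises IndexError
    | some x00 =>
      match PySem.List.pyGet? x00 0 with
      | none => []                  -- X[0][0][0] raises IndexError
      | some _ =>
        [ (X.length : Int),
          (PySem.List.max? (X.map (fun x => (x.length : Int))) (fun y => y)).getD 0,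
          (PySem.List.max? (X.flatMap (fun xs => xs.map (fun x => (x.length : Int)))) (fun y => y)).getD 0 ]

-- ===== PORT B =====
-- B's inner enumerate loop: elementwise max of the accumulator `sub` with the
-- child vector `d`, appending d's tail where sub is shorter.
def pvMerge : List Int → List Int → List Int
  | sub, [] => sub
  | [], val :: d => val :: pvMerge [] d
  | a :: sub, val :: d => (if val > a then val else a) :: pvMerge sub d

-- B's single recursive `dims(v, depth)` specialised to the three typed levels
-- (the depth == 3 ValueError branch is unreachable on List (List (List Int)):
-- level-2 children are ints, so `dims` returns [] for them).
def pvDims2 (v : List Int) : List Int :=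
  (v.length : Int) :: v.foldl (fun sub _c => pvMerge sub []) []

def pvDims1 (v : List (List Int)) : List Int :=
  (v.length : Int) :: v.foldl (fun sub c => pvMerge sub (pvDims2 c)) []

def maxLens_alt (X : List (List (List Int))) : List Int :=
  (X.length : Int) :: X.foldl (fun sub c => pvMerge sub (pvDims1 c)) []

-- ===== PRECONDITION & SPEC =====
-- Pre_ excludes exactly the inputs on which A raises IndexError: X, X[0] or
-- X[0][0] empty.
def Pre_maxLens (X : List (List (List Int))) : Prop :=
  X ≠ [] ∧ X.headI ≠ [] ∧ X.headI.headI ≠ []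
instance (X : List (List (List Int))) : Decidable (Pre_maxLens X) := by unfold Pre_maxLens; infer_instance

def pvWitness_maxLens : List (List (List Int)) := [[[1, 2], [3]], [[4, 5, 6]]]

def Spec_maxLens (X : List (List (List Int))) (out : List Int) : Prop := out = maxLens_alt X
instance (X : List (List (List Int))) (out : List Int) : Decidable (Spec_maxLens X out) := by unfold Spec_maxLens; infer_instance

-- ===== CLAIM (what is proved, stated in full; the proofs are below) =====
def Claim_equal_maxLens : Prop := ∀ (X : List (List (List Int))), Dom_maxLens X → Pre_maxLens X → Spec_maxLens X (maxLens X)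

-- ===== LEMMAS AND PROOFS =====

theorem pv_if_max (m l : Int) : (if l > m then l else m) = max m l := by
  split_ifs <;> omega

theorem pvMerge_nil_right (s : List Int) : pvMerge s [] = s := by
  cases s <;> rfl

theorem pvMerge_nil_left (d : List Int) : pvMerge [] d = d := by
  induction d with
  | nil => rfl
  | cons v t ih => simpa [pvMerge] using ih

theorem pvDims2_eq (v : List Int) : pvDims2 v = [(v.length : Int)] := by
  unfold pvDims2
  have h : ∀ (w : List Int), w.foldl (fun sub _c => pvMerge sub []) [] = [] := by
    intro w; induction w with
    | nil => rfl
    | cons a t ih => simp [pvMerge_nil_right, ih]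
  rw [h]

-- running singleton merges = running max
theorem pv_fold_singleton (cs : List (List Int)) (a : Int) :
    cs.foldl (fun sub c => pvMerge sub [(c.length : Int)]) [a]
      = [cs.foldl (fun m c => max m (c.length : Int)) a] := by
  induction cs generalizing a with
  | nil => rfl
  | cons c t ih =>
    simp only [List.foldl_cons, pvMerge, pv_if_max]
    exact ih _

theorem pvDims1_nil : pvDims1 [] = [0] := rfl

theorem pvDims1_cons (c0 : List Int) (cs : List (List Int)) :
    pvDims1 (c0 :: cs)
      = [((c0 :: cs).length : Int),
         cs.foldl (fun m c => max m (c.length : Int)) (c0.length : Int)] := by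
  unfold pvDims1
  simp only [List.foldl_cons, pvMerge_nil_left, pvDims2_eq]
  rw [pv_fold_singleton]

theorem pv_foldl_maxlen_init (cs : List (List Int)) (b c : Int) :
    cs.foldl (fun m cc => max m (cc.length : Int)) (max b c)
      = max b (cs.foldl (fun m cc => max m (cc.length : Int)) c) := by
  induction cs generalizing c with
  | nil => rfl
  | cons h t ih =>
    simp only [List.foldl_cons, max_assoc]
    exact ih _

-- the outer merge fold with a length-2 accumulator keeps the two running maxima
theorem pv_fold_outer (t : List (List (List Int))) (a b : Int) :
    t.foldl (fun sub c => pvMerge sub (pvDims1 c)) [a, b]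
      = [t.foldl (fun m c => max m (c.length : Int)) a,
         t.foldl (fun m c => c.foldl (fun m cc => max m (cc.length : Int)) m) b] := by
  induction t generalizing a b with
  | nil => rfl
  | cons c t ih =>
    cases c with
    | nil =>
      simp only [List.foldl_cons, pvDims1_nil, pvMerge, pv_if_max,
        List.foldl_nil]
      rw [ih]
      norm_num
    | cons c0 cs =>
      simp only [List.foldl_cons, pvDims1_cons, pvMerge, pv_if_max]
      rw [ih, pv_foldl_maxlen_init]

-- nested fold over X equals fold over the flattened length list
theorem pv_foldl_flat (X : List (List (List Int))) (i : Int) :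
    X.foldl (fun m xs => xs.foldl (fun m x => max m (x.length : Int)) m) i
      = (X.flatMap (fun xs => xs.map (fun x => (x.length : Int)))).foldl max i := by
  induction X generalizing i with
  | nil => rfl
  | cons xs t ih =>
    simp only [List.flatMap_cons, List.foldl_append, List.foldl_cons, List.foldl_map]
    exact ih _

-- ===== VERDICT (by name: the statement is the Claim_ definition above) =====
theorem maxLens_spec : Claim_equal_maxLens := by
  intro X _hDom hPre
  obtain ⟨h0, h1, h2⟩ := hPre
  obtain ⟨x0, t, rfl⟩ : ∃ x0 t, X = x0 :: t := by
    cases X with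
    | nil => exact absurd rfl h0
    | cons a b => exact ⟨a, b, rfl⟩
  simp only [List.headI] at h1 h2
  obtain ⟨y0, u, rfl⟩ : ∃ y0 u, x0 = y0 :: u := by
    cases x0 with
    | nil => exact absurd rfl h1
    | cons a b => exact ⟨a, b, rfl⟩
  obtain ⟨z0, v, rfl⟩ : ∃ z0 v, y0 = z0 :: v := by
    cases y0 with
    | nil => exact absurd rfl h2
    | cons a b => exact ⟨a, b, rfl⟩
  show maxLens _ = maxLens_alt _
  simp [maxLens, maxLens_alt, PySem.List.pyGet?, PySem.List.pyIdx?]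
  simp only [pvMerge_nil_left, pvDims1_cons, pv_fold_outer]
  congr 1
  · -- second entry: max of outer lengths
    rw [PySem.List.max?_id_cons, Option.getD_some, List.foldl_map]
    norm_num
  congr 1
  -- third entry: max of inner lengths
  rw [PySem.List.max?_id_cons, Option.getD_some, List.foldl_append, List.foldl_map,
    pv_foldl_flat]
  norm_num
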